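-- pv_equiv track=rewrite | github.com/FastyFresh/AIA-Engine | app/agents/hashtag_optimizer.py | format_hashtags
-- ===== SOURCE A (Python) =====
-- from typing import List, Dict, Any, Optional
--
-- def format_hashtags(hashtags: List[str], max_chars: Optional[int] = None) -> str:
--     """
--     Format hashtags into a string, respecting character limits.
--
--     Args:
--         hashtags: List of hashtag strings
--         max_chars: Optional max characters for the hashtag string
--
--     Returns:
--         Space-separated hashtag string
--     """
--     if not max_chars:
--         return " ".join(hashtags)
--
--     result = []
--     current_length = 0
--
--     for tag in hashtags:
--         tag_length = len(tag) + (1 if result else 0)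
--         if current_length + tag_length <= max_chars:
--             result.append(tag)
--             current_length += tag_length
--         else:
--             break
--
--     return " ".join(result)
-- ===== SOURCE B (Python) =====
-- def format_hashtags(hashtags, max_chars=None):
--     if not max_chars:
--         return " ".join(hashtags)
--     # cumulative joined-prefix lengths: cum[i] = len(" ".join(hashtags[:i+1]))
--     cum = []
--     total = 0
--     for i, tag in enumerate(hashtags):
--         total += len(tag) + (1 if i else 0)
--         cum.append(total)
--     # cum is nondecreasing, so the fitting prefixes are exactly those counted here
--     n = sum(1 for c in cum if c <= max_chars)
--     return " ".join(hashtags[:n])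
-- ===== Notes on version B (the rewrite author's own statement) =====
-- stated objective: alternative
-- what changed: Replaces A's interleaved accumulate-and-break loop over the tags with a two-phase decomposition: first build the full cumulative joined-prefix-length array, then count (over the whole, nondecreasing array) how many prefixes fit and slice-and-join that prefix.
import Mathlib
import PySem

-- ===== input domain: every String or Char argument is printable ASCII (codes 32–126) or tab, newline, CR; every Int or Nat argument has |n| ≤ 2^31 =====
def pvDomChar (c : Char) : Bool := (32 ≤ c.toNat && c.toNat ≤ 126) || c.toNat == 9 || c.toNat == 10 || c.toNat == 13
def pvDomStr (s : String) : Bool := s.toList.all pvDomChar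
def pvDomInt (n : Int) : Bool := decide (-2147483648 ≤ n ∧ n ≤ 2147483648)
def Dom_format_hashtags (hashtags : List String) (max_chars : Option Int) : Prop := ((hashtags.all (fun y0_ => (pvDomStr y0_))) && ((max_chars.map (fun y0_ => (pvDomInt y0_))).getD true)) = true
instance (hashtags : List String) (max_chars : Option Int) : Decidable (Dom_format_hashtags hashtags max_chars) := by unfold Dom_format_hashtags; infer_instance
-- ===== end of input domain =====

-- B replaces A's accumulate-and-break loop by building the full cumulative prefix-length
-- array, counting the fitting prefixes, then joining that prefix (alternative decomposition).

-- ===== PORT A =====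
-- A's for-loop with break: recursion over the tags carrying (result, current_length)
def fhLoopA (m : Int) : List String → List String → Int → List String
  | [], res, _ => res
  | t :: rest, res, cur =>
    let tl : Int := PySem.Str.len t + (if res ≠ [] then 1 else 0)
    if cur + tl ≤ m then fhLoopA m rest (res ++ [t]) (cur + tl) else res

def format_hashtags (hashtags : List String) (max_chars : Option Int) : String :=
  match max_chars with
  | none => PySem.Str.join " " hashtags
  | some m =>
    if m = 0 then PySem.Str.join " " hashtags  -- `if not max_chars` also fires on 0
    else PySem.Str.join " " (fhLoopA m hashtags [] 0)

-- ===== PORT B =====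
-- Source B's `for i, tag in enumerate(hashtags): total += len(tag) + (1 if i else 0); cum.append(total)`
def fhCum : List String → Nat → Int → List Int
  | [], _, _ => []
  | t :: rest, i, total =>
    let total' := total + PySem.Str.len t + (if i ≠ 0 then 1 else 0)
    total' :: fhCum rest (i + 1) total'

def format_hashtags_alt (hashtags : List String) (max_chars : Option Int) : String :=
  match max_chars with
  | none => PySem.Str.join " " hashtags
  | some m =>
    if m = 0 then PySem.Str.join " " hashtags
    else
      let cum := fhCum hashtags 0 0
      let n := cum.countP (fun c => decide (c ≤ m))
      PySem.Str.join " " (hashtags.take n)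

-- ===== PRECONDITION & SPEC =====
def Spec_format_hashtags (hashtags : List String) (max_chars : Option Int) (out : String) : Prop := out = format_hashtags_alt hashtags max_chars
instance (hashtags : List String) (max_chars : Option Int) (out : String) : Decidable (Spec_format_hashtags hashtags max_chars out) := by unfold Spec_format_hashtags; infer_instance

-- ===== CLAIM (what is proved, stated in full; the proofs are below) =====
def Claim_equal_format_hashtags : Prop := ∀ (hashtags : List String) (max_chars : Option Int), Dom_format_hashtags hashtags max_chars → Spec_format_hashtags hashtags max_chars (format_hashtags hashtags max_chars)

-- ===== LEMMAS AND PROOFS =====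

lemma fhCum_mono : ∀ (tags : List String) (i : Nat) (total x : Int),
    x ∈ fhCum tags i total → total ≤ x := by
  intro tags
  induction tags with
  | nil => intro i total x h; simp [fhCum] at h
  | cons t rest ih =>
    intro i total x h
    simp only [fhCum, List.mem_cons] at h
    have hlen : (0 : Int) ≤ PySem.Str.len t := by
      simp [PySem.Str.len]
    rcases h with h | h
    · subst h; split_ifs <;> omega
    · have := ih (i + 1) _ x h
      split_ifs at this <;> omega

lemma fhLoopA_eq_take (m : Int) : ∀ (tags : List String) (res : List String) (i : Nat) (cur : Int),
    (res = [] ↔ i = 0) →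
    fhLoopA m tags res cur = res ++ tags.take ((fhCum tags i cur).countP (fun c => decide (c ≤ m))) := by
  intro tags
  induction tags with
  | nil => intro res i cur _; simp [fhLoopA, fhCum]
  | cons t rest ih =>
    intro res i cur hflag
    have hiff : (res ≠ []) = (i ≠ 0) := by
      by_cases h : res = [] <;> simp [h, hflag.mp]; tauto
    simp only [fhLoopA, fhCum]
    simp only [hiff]
    set tot := cur + (PySem.Str.len t + (if i ≠ 0 then 1 else 0)) with htot
    have htot2 : cur + PySem.Str.len t + (if i ≠ 0 then 1 else 0) = tot := by omega
    rw [htot2]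
    by_cases hle : tot ≤ m
    · rw [if_pos hle]
      rw [ih (res ++ [t]) (i + 1) tot (by simp)]
      simp [hle, List.take_succ_cons]
    · rw [if_neg hle]
      have hrest : (fhCum rest (i + 1) tot).countP (fun c => decide (c ≤ m)) = 0 := by
        rw [List.countP_eq_zero]
        intro x hx
        have := fhCum_mono rest (i + 1) tot x hx
        simp; omega
      simp [hle, hrest]

-- ===== VERDICT (by name: the statement is the Claim_ definition above) =====
theorem format_hashtags_spec : Claim_equal_format_hashtags := by
  unfold Claim_equal_format_hashtags Spec_format_hashtags
  intro hashtags max_chars _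
  cases max_chars with
  | none => rfl
  | some m =>
    simp only [format_hashtags, format_hashtags_alt]
    by_cases hm : m = 0
    · simp [hm]
    · simp only [hm, if_false]
      rw [fhLoopA_eq_take m hashtags [] 0 0 (by simp)]
      simp
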